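-- pv_equiv track=rewrite | github.com/hon121215/Programmers_Practice | 프로그래머스/0/181854. 배열의 길이에 따라 다른 연산하기/배열의 길이에 따라 다른 연산하기.py | solution
-- ===== SOURCE A (Python) =====
-- def solution(arr, n):
--     answer = []
--     if len(arr) % 2 == 0:
--         for x in range(len(arr)):
--             if x % 2 == 1:
--                 answer.append(arr[x] + n)
--             else:
--                 answer.append(arr[x])
--     elif len(arr) % 2 == 1:
--         for x in range(len(arr)):
--             if x % 2 == 0:
--                 answer.append(arr[x] + n)
--             else:
--                 answer.append(arr[x])
--
--     return answer
-- ===== SOURCE B (Python) =====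
-- def solution(arr, n):
--     answer = list(arr)
--     start = (len(arr) + 1) % 2
--     for i in range(start, len(arr), 2):
--         answer[i] += n
--     return answer
-- ===== Notes on version B (the rewrite author's own statement) =====
-- stated objective: simpler
-- what changed: B copies the array once and runs a single strided loop range(start, len, 2) adding n only at the indices that change, instead of A's two full-length branched loops appending element by element.
import Mathlib
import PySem

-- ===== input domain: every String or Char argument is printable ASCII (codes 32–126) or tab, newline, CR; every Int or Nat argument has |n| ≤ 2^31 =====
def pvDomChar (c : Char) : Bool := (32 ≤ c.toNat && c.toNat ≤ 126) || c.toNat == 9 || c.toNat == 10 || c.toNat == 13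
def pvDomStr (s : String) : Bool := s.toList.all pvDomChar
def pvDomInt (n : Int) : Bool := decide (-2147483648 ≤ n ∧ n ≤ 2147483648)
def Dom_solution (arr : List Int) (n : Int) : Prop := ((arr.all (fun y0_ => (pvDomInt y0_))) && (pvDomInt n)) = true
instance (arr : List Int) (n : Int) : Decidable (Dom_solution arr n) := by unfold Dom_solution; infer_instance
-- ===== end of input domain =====

-- B replaces A's two full-length branched append loops by one copy plus a single strided
-- loop over only the indices that change (simpler decomposition, same O(n) cost).

-- ===== PORT A =====
def solution (arr : List Int) (n : Int) : List Int :=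
  if PySem.Int.mod (arr.length : Int) 2 == 0 then
    (PySem.List.pyRange 0 (arr.length : Int) 1).foldl
      (fun answer x =>
        if PySem.Int.mod x 2 == 1 then answer ++ [PySem.List.pyGetD arr x 0 + n]
        else answer ++ [PySem.List.pyGetD arr x 0]) []
  else if PySem.Int.mod (arr.length : Int) 2 == 1 then
    (PySem.List.pyRange 0 (arr.length : Int) 1).foldl
      (fun answer x =>
        if PySem.Int.mod x 2 == 0 then answer ++ [PySem.List.pyGetD arr x 0 + n]
        else answer ++ [PySem.List.pyGetD arr x 0]) []
  else []

-- ===== PORT B =====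
def solution_alt (arr : List Int) (n : Int) : List Int :=
  let start := PySem.Int.mod ((arr.length : Int) + 1) 2
  (PySem.List.pyRange start (arr.length : Int) 2).foldl
    (fun answer i => answer.set i.toNat (PySem.List.pyGetD answer i 0 + n)) arr

-- ===== PRECONDITION & SPEC =====
def Spec_solution (arr : List Int) (n : Int) (out : List Int) : Prop := out = solution_alt arr n
instance (arr : List Int) (n : Int) (out : List Int) : Decidable (Spec_solution arr n out) := by unfold Spec_solution; infer_instance

-- ===== CLAIM (what is proved, stated in full; the proofs are below) =====
def Claim_equal_solution : Prop := ∀ (arr : List Int) (n : Int), Dom_solution arr n → Spec_solution arr n (solution arr n)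

-- ===== LEMMAS AND PROOFS =====

theorem pymod_two (a : Int) : PySem.Int.mod a 2 = a % 2 := by
  show a.fmod 2 = a % 2
  rw [Int.fmod_eq_emod]; norm_num

-- A's per-element branched append loop is a map.
theorem foldl_branch_append {α β : Type} (l : List α) (c : α → Bool) (u v : α → β) (acc : List β) :
    l.foldl (fun a x => if c x then a ++ [u x] else a ++ [v x]) acc
      = acc ++ l.map (fun x => if c x then u x else v x) := by
  induction l generalizing acc with
  | nil => simp
  | cons y ys ih => simp only [List.foldl_cons, List.map_cons]; split <;> simp [ih]

-- B's strided set-loop, pointwise: length is preserved …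
theorem foldl_set_length (n : Int) (idxs : List Int) (a : List Int) :
    (idxs.foldl (fun ans i => ans.set i.toNat (PySem.List.pyGetD ans i 0 + n)) a).length
      = a.length := by
  induction idxs generalizing a with
  | nil => rfl
  | cons i rest ih => simp [ih]

-- … and each position gets +n exactly when its index is in the stride list.
theorem foldl_set_getD (n : Int) (idxs : List Int) :
    ∀ (a : List Int), idxs.Nodup → (∀ i ∈ idxs, 0 ≤ i ∧ i.toNat < a.length) →
    ∀ j : Nat,
      (idxs.foldl (fun ans i => ans.set i.toNat (PySem.List.pyGetD ans i 0 + n)) a).getD j 0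
        = if (j : Int) ∈ idxs then a.getD j 0 + n else a.getD j 0 := by
  induction idxs with
  | nil => intro a _ _ j; simp
  | cons i rest ih =>
    intro a hnd hb j
    have hi := hb i (List.mem_cons_self ..)
    have hrest : ∀ x ∈ rest, 0 ≤ x ∧ x.toNat < (a.set i.toNat (PySem.List.pyGetD a i 0 + n)).length := by
      intro x hx; simpa using hb x (List.mem_cons_of_mem _ hx)
    have hnotin : i ∉ rest := (List.nodup_cons.mp hnd).1
    rw [List.foldl_cons, ih _ (List.nodup_cons.mp hnd).2 hrest j]
    rw [PySem.List.pyGetD_of_nonneg _ _ hi.1]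
    by_cases hjr : (j : Int) ∈ rest
    · have hji : (j : Int) ≠ i := fun h => hnotin (h ▸ hjr)
      have : j ≠ i.toNat := by omega
      simp only [List.getD, List.getElem?_set_ne (Ne.symm this)]
      simp [hjr, hji]
    · by_cases hji : (j : Int) = i
      · have hj' : j = i.toNat := by omega
        subst hj'
        rw [hji, if_neg hnotin, if_pos (List.mem_cons_self ..)]
        simp [List.getD, List.getElem?_set_self hi.2]
      · have : j ≠ i.toNat := by omega
        simp only [List.getD, List.getElem?_set_ne (Ne.symm this)]
        simp [hjr, hji]

theorem solution_alt_getD (arr : List Int) (n : Int) (j : Nat) (hj : j < arr.length) :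
    (solution_alt arr n).getD j 0
      = if (j : Int) % 2 = ((arr.length : Int) + 1) % 2 then arr.getD j 0 + n else arr.getD j 0 := by
  unfold solution_alt
  have hs : (0:Int) < 2 := by norm_num
  rw [pymod_two]
  rw [foldl_set_getD n _ arr ?nd ?bd j]
  case nd =>
    rw [PySem.List.pyRange_of_pos _ _ hs]
    exact (List.nodup_range).map (fun x y h => by omega)
  case bd =>
    intro i hi
    rw [PySem.List.mem_pyRange_iff_of_pos hs] at hi
    constructor
    · have := hi.1; omega
    · have := hi.2.1; omega
  have hmem : ((j : Int) ∈ PySem.List.pyRange (((arr.length : Int) + 1) % 2) (arr.length : Int) 2)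
      ↔ ((j : Int) % 2 = ((arr.length : Int) + 1) % 2) := by
    rw [PySem.List.mem_pyRange_iff_of_pos hs]; omega
  simp only [hmem]

theorem solution_alt_length (arr : List Int) (n : Int) :
    (solution_alt arr n).length = arr.length := by
  unfold solution_alt
  exact foldl_set_length n _ arr

-- ===== VERDICT (by name: the statement is the Claim_ definition above) =====
theorem solution_spec : Claim_equal_solution := by
  intro arr n _
  unfold Spec_solution
  have hrange : (PySem.List.pyRange 0 (arr.length : Int) 1)
      = (List.range arr.length).map (fun k : Nat => (k : Int)) :=
    PySem.List.pyRange_zero_natCast arr.length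
  have hchar : ∀ j : Nat, j < arr.length →
      (solution arr n).getD j 0
        = if (j : Int) % 2 = ((arr.length : Int) + 1) % 2 then arr.getD j 0 + n else arr.getD j 0 := by
    intro j hj
    unfold solution
    by_cases hpar : (arr.length : Int) % 2 = 0
    · rw [if_pos (by simp [PySem.Int.mod, Int.fmod_eq_emod, hpar])]
      rw [hrange, List.foldl_map, foldl_branch_append, List.nil_append]
      rw [List.getD_eq_getElem _ _ (by simpa using hj)]
      simp only [List.getElem_map, List.getElem_range]
      rw [PySem.List.pyGetD_of_nonneg _ _ (Int.natCast_nonneg j), Int.toNat_natCast]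
      have hcond : ((PySem.Int.mod (j : Int) 2 == 1) = true)
          ↔ ((j : Int) % 2 = ((arr.length : Int) + 1) % 2) := by
        simp only [pymod_two, beq_iff_eq]; omega
      rw [if_congr hcond rfl rfl]
    · have hpar1 : (arr.length : Int) % 2 = 1 := by omega
      rw [if_neg (by simp [PySem.Int.mod, Int.fmod_eq_emod, hpar]), if_pos (by simp [PySem.Int.mod, Int.fmod_eq_emod, hpar1])]
      rw [hrange, List.foldl_map, foldl_branch_append, List.nil_append]
      rw [List.getD_eq_getElem _ _ (by simpa using hj)]
      simp only [List.getElem_map, List.getElem_range]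
      rw [PySem.List.pyGetD_of_nonneg _ _ (Int.natCast_nonneg j), Int.toNat_natCast]
      have hcond : ((PySem.Int.mod (j : Int) 2 == 0) = true)
          ↔ ((j : Int) % 2 = ((arr.length : Int) + 1) % 2) := by
        simp only [pymod_two, beq_iff_eq]; omega
      rw [if_congr hcond rfl rfl]
  have hlenA : (solution arr n).length = arr.length := by
    unfold solution
    by_cases hpar : (arr.length : Int) % 2 = 0
    · rw [if_pos (by simp [PySem.Int.mod, Int.fmod_eq_emod, hpar])]
      rw [hrange, List.foldl_map, foldl_branch_append]; simp
    · have hpar1 : (arr.length : Int) % 2 = 1 := by omega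
      rw [if_neg (by simp [PySem.Int.mod, Int.fmod_eq_emod, hpar]), if_pos (by simp [PySem.Int.mod, Int.fmod_eq_emod, hpar1])]
      rw [hrange, List.foldl_map, foldl_branch_append]; simp
  apply List.ext_getElem
  · rw [hlenA, solution_alt_length]
  · intro i h1 h2
    have hi : i < arr.length := by rwa [hlenA] at h1
    have hA := hchar i hi
    rw [List.getD_eq_getElem _ _ h1] at hA
    have hB := solution_alt_getD arr n i hi
    rw [List.getD_eq_getElem _ _ h2] at hB
    rw [hA, hB]
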